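-- pv_equiv track=rewrite | github.com/BartvonMeijenfeldt/advent_of_code_2023 | 14/part1.py | get_rounded_rocks_final_positions_for_col
-- ===== SOURCE A (Python) =====
-- def get_rounded_rocks_final_positions_for_col(col: list[str]) -> list[int]:
--     final_positions = []
--
--     start_rounded_rocks = 0
--     nr_rounded_rocks = 0
--
--     for i, c in enumerate(col):
--         if c == "O":
--             final_positions.append(start_rounded_rocks + nr_rounded_rocks)
--             nr_rounded_rocks += 1
--         elif c == "#":
--             start_rounded_rocks = i + 1
--             nr_rounded_rocks = 0
--
--     return final_positions
-- ===== SOURCE B (Python) =====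
-- def get_rounded_rocks_final_positions_for_col(col: list[str]) -> list[int]:
--     # Segment decomposition: split the column at '#' barriers; for each segment,
--     # count its 'O' rocks and emit them as one contiguous block.
--     res = []
--     n = len(col)
--     start = 0
--     while True:
--         j = start
--         while j < n and col[j] != "#":
--             j += 1
--         cnt = col[start:j].count("O")
--         res.extend(range(start, start + cnt))
--         if j == n:
--             return res
--         start = j + 1
-- ===== Notes on version B (the rewrite author's own statement) =====
-- stated objective: alternative
-- what changed: Replaces A's single interleaved scan (per-rock append with running start/count state) by a recursive segment decomposition: split the column at '#' barriers, count the 'O' rocks per segment, and emit each segment's rocks as one contiguous range block.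
import Mathlib
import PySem

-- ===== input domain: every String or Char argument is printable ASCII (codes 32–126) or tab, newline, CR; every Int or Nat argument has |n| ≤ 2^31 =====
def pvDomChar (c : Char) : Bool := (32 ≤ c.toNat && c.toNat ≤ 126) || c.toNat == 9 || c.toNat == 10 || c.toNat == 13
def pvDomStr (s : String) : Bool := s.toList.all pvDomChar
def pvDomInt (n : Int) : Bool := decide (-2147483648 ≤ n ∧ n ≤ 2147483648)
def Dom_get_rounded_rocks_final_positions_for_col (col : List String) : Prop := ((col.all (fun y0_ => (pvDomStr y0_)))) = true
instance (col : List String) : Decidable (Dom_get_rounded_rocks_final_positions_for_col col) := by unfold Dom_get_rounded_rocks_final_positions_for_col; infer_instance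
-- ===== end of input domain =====

-- B replaces A's interleaved per-rock scan by a segment decomposition (split at '#',
-- count 'O' per segment, emit one contiguous range block per segment); alternative, same cost.

-- ===== PORT A =====
-- A's for-loop over enumerate(col) as structural recursion over the same state
-- (i = current index, start = start_rounded_rocks, nr = nr_rounded_rocks).
def pvAGo : List String → Int → Int → Int → List Int
  | [], _, _, _ => []
  | c :: rest, i, start, nr =>
    if c = "O" then (start + nr) :: pvAGo rest (i + 1) start (nr + 1)
    else if c = "#" then pvAGo rest (i + 1) (i + 1) 0
    else pvAGo rest (i + 1) start nr

def get_rounded_rocks_final_positions_for_col (col : List String) : List Int :=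
  pvAGo col 0 0 0

-- ===== PORT B =====
-- Source B's `place`: scan to the first '#' (takeWhile/dropWhile), count 'O' in the
-- segment, emit list(range(start, start+cnt)), recurse past the barrier.
-- The extra fuel argument is only a totality guard (fuel = length + 1 always suffices).
def pvPlace : Nat → Int → List String → List Int
  | 0, _, _ => []
  | fuel + 1, start, rest =>
    let seg := rest.takeWhile (fun c => c ≠ "#")
    let cnt := seg.count "O"
    let block := PySem.List.pyRange start (start + cnt) 1
    match rest.dropWhile (fun c => c ≠ "#") with
    | [] => block
    | _ :: tl => block ++ pvPlace fuel (start + seg.length + 1) tl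

def get_rounded_rocks_final_positions_for_col_alt (col : List String) : List Int :=
  pvPlace (col.length + 1) 0 col

-- ===== PRECONDITION & SPEC =====
def Spec_get_rounded_rocks_final_positions_for_col (col : List String) (out : List Int) : Prop := out = get_rounded_rocks_final_positions_for_col_alt col
instance (col : List String) (out : List Int) : Decidable (Spec_get_rounded_rocks_final_positions_for_col col out) := by unfold Spec_get_rounded_rocks_final_positions_for_col; infer_instance

-- ===== CLAIM (what is proved, stated in full; the proofs are below) =====
def Claim_equal_get_rounded_rocks_final_positions_for_col : Prop := ∀ (col : List String), Dom_get_rounded_rocks_final_positions_for_col col → Spec_get_rounded_rocks_final_positions_for_col col (get_rounded_rocks_final_positions_for_col col)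

-- ===== LEMMAS AND PROOFS =====

-- any sufficient fuel gives the same value
theorem pvPlace_stable : ∀ (fuel fuel' : Nat) (start : Int) (rest : List String),
    rest.length < fuel → rest.length < fuel' →
    pvPlace fuel start rest = pvPlace fuel' start rest := by
  intro fuel
  induction fuel with
  | zero => intro fuel' start rest h _; omega
  | succ fuel ih =>
    intro fuel' start rest h h'
    cases fuel' with
    | zero => omega
    | succ fuel' =>
      simp only [pvPlace]
      cases hdw : rest.dropWhile (fun c => c ≠ "#") with
      | nil => rfl
      | cons x tl =>
        have hle : (rest.dropWhile (fun c => c ≠ "#")).length ≤ rest.length :=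
          (List.dropWhile_sublist _).length_le
        rw [hdw] at hle
        simp at hle
        dsimp only
        rw [ih fuel' _ tl (by omega) (by omega)]

-- continuation: what both sides do after the current segment, given absolute head index i
def pvCont (rest : List String) (i : Int) : List Int :=
  match rest.dropWhile (fun c => c ≠ "#") with
  | [] => []
  | _ :: tl => pvPlace (tl.length + 1) (i + (rest.takeWhile (fun c => c ≠ "#")).length + 1) tl

theorem pvPlace_unfold (start : Int) (rest : List String) :
    pvPlace (rest.length + 1) start rest =
      PySem.List.pyRange start (start + (rest.takeWhile (fun c => c ≠ "#")).count "O") 1 ++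
      pvCont rest start := by
  rw [pvPlace, pvCont]
  cases hdw : rest.dropWhile (fun c => c ≠ "#") with
  | nil => simp
  | cons x tl =>
    have hle : (rest.dropWhile (fun c => c ≠ "#")).length ≤ rest.length :=
      (List.dropWhile_sublist _).length_le
    rw [hdw] at hle
    simp at hle
    dsimp only
    rw [pvPlace_stable rest.length (tl.length + 1) _ tl (by omega) (by omega)]

theorem pvAGo_eq (rest : List String) : ∀ (i start nr : Int),
    pvAGo rest i start nr =
      PySem.List.pyRange (start + nr) (start + nr + (rest.takeWhile (fun c => c ≠ "#")).count "O") 1 ++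
      pvCont rest i := by
  induction rest with
  | nil =>
    intro i start nr
    simp [pvAGo, pvCont, PySem.List.pyRange_one_eq_nil (by omega : (start + nr : Int) ≤ start + nr)]
  | cons c rest ih =>
    intro i start nr
    by_cases hO : c = "O"
    · subst hO
      simp only [pvAGo]
      have hseg : (("O" : String) :: rest).takeWhile (fun c => c ≠ "#") =
          "O" :: rest.takeWhile (fun c => c ≠ "#") := by simp [List.takeWhile]
      have hcnt : ((("O" : String) :: rest).takeWhile (fun c => c ≠ "#")).count "O" =
          (rest.takeWhile (fun c => c ≠ "#")).count "O" + 1 := by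
        rw [hseg]; simp
      have hcont : pvCont (("O" : String) :: rest) i = pvCont rest (i + 1) := by
        unfold pvCont
        rw [hseg]
        have hdw : (("O" : String) :: rest).dropWhile (fun c => c ≠ "#") =
            rest.dropWhile (fun c => c ≠ "#") := by simp [List.dropWhile]
        rw [hdw]
        cases rest.dropWhile (fun c => c ≠ "#") with
        | nil => rfl
        | cons x tl => simp; ring_nf
      rw [ih (i + 1) start (nr + 1), hcnt, hcont]
      have hcons : PySem.List.pyRange (start + nr)
          (start + nr + (((rest.takeWhile (fun c => c ≠ "#")).count "O" + 1 : Nat) : Int)) 1 =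
          (start + nr) :: PySem.List.pyRange (start + nr + 1)
            (start + nr + (((rest.takeWhile (fun c => c ≠ "#")).count "O" + 1 : Nat) : Int)) 1 :=
        PySem.List.pyRange_one_cons (by push_cast; omega)
      have eB : start + (nr + 1) + ((rest.takeWhile (fun c => c ≠ "#")).count "O" : Int)
          = start + nr + (((rest.takeWhile (fun c => c ≠ "#")).count "O" + 1 : Nat) : Int) := by
        push_cast; ring
      have eA : start + (nr + 1) = start + nr + 1 := by ring
      rw [eB, eA, hcons, List.cons_append]
      simp
    · by_cases hH : c = "#"
      · subst hH
        simp only [pvAGo, if_neg (by decide : ¬("#" : String) = "O")]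
        rw [ih (i + 1) (i + 1) 0]
        have hseg : (("#" : String) :: rest).takeWhile (fun c => c ≠ "#") = [] := by
          simp [List.takeWhile]
        have hrange0 : PySem.List.pyRange (start + nr)
            (start + nr + ((("#" : String) :: rest).takeWhile (fun c => c ≠ "#")).count "O") 1 = [] := by
          rw [hseg]
          exact PySem.List.pyRange_one_eq_nil (by simp)
        rw [hrange0]
        have hcont : pvCont (("#" : String) :: rest) i = pvPlace (rest.length + 1) (i + 1) rest := by
          unfold pvCont
          have hdw : (("#" : String) :: rest).dropWhile (fun c => c ≠ "#") =
              "#" :: rest := by simp [List.dropWhile]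
          rw [hdw, hseg]
          simp
        rw [hcont, pvPlace_unfold (i + 1) rest, List.nil_append]
        have e1 : i + 1 + (0 : Int) = i + 1 := by ring
        rw [e1]
        simp
      · simp only [pvAGo, if_neg (fun h => hO h), if_neg (fun h => hH h)]
        rw [ih (i + 1) start nr]
        have hseg : (c :: rest).takeWhile (fun c => c ≠ "#") =
            c :: rest.takeWhile (fun c => c ≠ "#") := by
          simp [List.takeWhile, hH]
        have hcnt : ((c :: rest).takeWhile (fun c => c ≠ "#")).count "O" =
            (rest.takeWhile (fun c => c ≠ "#")).count "O" := by
          rw [hseg]; simp [hO]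
        have hcont : pvCont (c :: rest) i = pvCont rest (i + 1) := by
          unfold pvCont
          rw [hseg]
          have hdw : (c :: rest).dropWhile (fun c => c ≠ "#") =
              rest.dropWhile (fun c => c ≠ "#") := by simp [List.dropWhile, hH]
          rw [hdw]
          cases rest.dropWhile (fun c => c ≠ "#") with
          | nil => rfl
          | cons x tl => simp; ring_nf
        rw [hcnt, hcont]

-- ===== VERDICT (by name: the statement is the Claim_ definition above) =====
theorem get_rounded_rocks_final_positions_for_col_spec : Claim_equal_get_rounded_rocks_final_positions_for_col := by
  intro col _
  unfold Spec_get_rounded_rocks_final_positions_for_col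
  unfold get_rounded_rocks_final_positions_for_col get_rounded_rocks_final_positions_for_col_alt
  rw [pvAGo_eq col 0 0 0, pvPlace_unfold]
  simp
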